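-- pv_equiv track=rewrite | github.com/transfinite-rathore/Resume-Parsing-and-Job-Matching-System | ResumerParsing/parsing.py | parsed_details
-- ===== SOURCE A (Python) =====
-- def parsed_details(docs_words,section_list):
--     section_map={}
--     for i in range(len(section_list)):
--         if(i==len(section_list)-1):
--             start_idx=docs_words.index(section_list[i])
--             section_map[section_list[i].capitalize()]=docs_words[start_idx+1:]
--         else:
--             start_idx=docs_words.index(section_list[i])
--             end_idx=docs_words.index(section_list[i+1])
--             section_map[section_list[i].capitalize()]=docs_words[start_idx+1:end_idx]
--
--     return section_map
-- ===== SOURCE B (Python) =====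
-- def parsed_details(docs_words, section_list):
--     # Walk the section names back-to-front, threading the current end boundary
--     # (initially len(docs_words)) through the recursion-like pass; then build
--     # the dict from the collected pairs in forward order.
--     pairs = []
--     end = len(docs_words)
--     for name in reversed(section_list):
--         start = docs_words.index(name)
--         pairs.append((name.capitalize(), docs_words[start + 1:end]))
--         end = start
--     section_map = {}
--     for name, words in reversed(pairs):
--         section_map[name] = words
--     return section_map
-- ===== Notes on version B (the rewrite author's own statement) =====
-- stated objective: alternative
-- what changed: B traverses the section names back-to-front, threading the end boundary (initially len(docs_words)) as state so each iteration does exactly one .index lookup and there is no last-element if/else or lookahead, then builds the dict from the reversed pair list.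
import Mathlib
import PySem

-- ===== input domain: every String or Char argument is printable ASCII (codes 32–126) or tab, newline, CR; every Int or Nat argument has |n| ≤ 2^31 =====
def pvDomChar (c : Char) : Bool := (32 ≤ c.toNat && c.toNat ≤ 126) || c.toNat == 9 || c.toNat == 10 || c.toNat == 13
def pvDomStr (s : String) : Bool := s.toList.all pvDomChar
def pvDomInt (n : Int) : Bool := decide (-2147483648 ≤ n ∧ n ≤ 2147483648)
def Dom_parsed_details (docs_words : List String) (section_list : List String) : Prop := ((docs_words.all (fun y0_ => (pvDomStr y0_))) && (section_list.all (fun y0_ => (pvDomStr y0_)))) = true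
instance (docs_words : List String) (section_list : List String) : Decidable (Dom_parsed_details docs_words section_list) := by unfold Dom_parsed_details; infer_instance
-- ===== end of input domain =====

-- B walks the section names back-to-front threading the end boundary as state (one .index per
-- name, no lookahead, no last-element special case), then builds the dict forwards from the
-- reversed pair list; equivalence on inputs where every section name occurs in docs_words
-- (elsewhere Python's .index raises ValueError in both).

-- ===== PORT A =====
-- str.capitalize(): first char upper-cased, rest lower-cased (exact on the ASCII domain)
def pyCapitalize (s : String) : String :=
  match s.toList with
  | [] => ""
  | c :: cs => String.ofList (PySem.Chars.upperChar c :: PySem.Chars.lower cs)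

-- A's loop over i in range(len(section_list)), recursing on the remaining suffix;
-- the singleton case is A's 'i == len-1' branch; a missing section (ValueError in Python,
-- excluded by Pre_) stops the loop.
def parsedA_loop (docs_words : List String) :
    List String → PySem.Dict String (List String) → PySem.Dict String (List String)
  | [], d => d
  | [s], d =>
      match PySem.List.index? docs_words s with
      | none => d
      | some start =>
          d.insert (pyCapitalize s)
            (PySem.List.slice docs_words (some ((start : Int) + 1)) none)
  | s :: t :: rest, d =>
      match PySem.List.index? docs_words s, PySem.List.index? docs_words t with
      | some start, some stop =>
          parsedA_loop docs_words (t :: rest)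
            (d.insert (pyCapitalize s)
              (PySem.List.slice docs_words (some ((start : Int) + 1)) (some (stop : Int))))
      | _, _ => d

def parsed_details (docs_words : List String) (section_list : List String) :
    List (String × List String) :=
  (parsedA_loop docs_words section_list PySem.Dict.empty).items

-- ===== PORT B =====
-- B's backward pass: 'for name in reversed(section_list)' with the end boundary threaded as
-- state, appending one (capitalized name, slice) pair per name. A missing section (ValueError
-- in Python, excluded by Pre_) stops the pass.
def parsedB_pairs (docs_words : List String) :
    List String → Int → List (String × List String)
  | [], _ => []
  | s :: rest, e =>
      match PySem.List.index? docs_words s with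
      | none => []
      | some start =>
          (pyCapitalize s,
            PySem.List.slice docs_words (some ((start : Int) + 1)) (some e)) ::
            parsedB_pairs docs_words rest (start : Int)

def parsed_details_alt (docs_words : List String) (section_list : List String) :
    List (String × List String) :=
  -- pairs built over reversed(section_list) with end = len(docs_words) initially
  let pairs := parsedB_pairs docs_words section_list.reverse (docs_words.length : Int)
  -- for name, words in reversed(pairs): section_map[name] = words
  (pairs.reverse.foldl (fun d p => d.insert p.1 p.2) PySem.Dict.empty).items

-- ===== PRECONDITION & SPEC =====
-- Pre_ excludes exactly the inputs where some section name is absent from docs_words: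
-- there Python's list.index raises ValueError in both A and B.
def Pre_parsed_details (docs_words : List String) (section_list : List String) : Prop :=
  ∀ s ∈ section_list, s ∈ docs_words
instance (docs_words : List String) (section_list : List String) :
    Decidable (Pre_parsed_details docs_words section_list) := by
  unfold Pre_parsed_details; infer_instance

def pvWitness_parsed_details : List String × List String :=
  (["skills", "python", "java", "education", "mit"], ["skills", "education"])

def Spec_parsed_details (docs_words : List String) (section_list : List String)
    (out : List (String × List String)) : Prop :=
  out = parsed_details_alt docs_words section_list
instance (docs_words : List String) (section_list : List String)
    (out : List (String × List String)) : Decidable (Spec_parsed_details docs_words section_list out) := by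
  unfold Spec_parsed_details; infer_instance

-- ===== CLAIM (what is proved, stated in full; the proofs are below) =====
def Claim_equal_parsed_details : Prop :=
  ∀ (docs_words : List String) (section_list : List String),
    Dom_parsed_details docs_words section_list →
    Pre_parsed_details docs_words section_list →
    Spec_parsed_details docs_words section_list (parsed_details docs_words section_list)

-- ===== LEMMAS AND PROOFS =====

-- forward pair list with a generic final boundary e: the common reference shape
def pairsF (docs_words : List String) : List String → Int → List (String × List String)
  | [], _ => []
  | [s], e =>
      ((pyCapitalize s,
        PySem.List.slice docs_words
          (some (((PySem.List.index? docs_words s).getD 0 : Nat) + 1)) (some e)) :: [])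
  | s :: t :: rest, e =>
      (pyCapitalize s,
        PySem.List.slice docs_words
          (some (((PySem.List.index? docs_words s).getD 0 : Nat) + 1))
          (some (((PySem.List.index? docs_words t).getD 0 : Nat) : Int))) ::
        pairsF docs_words (t :: rest) e

-- a full-length upper bound makes the final slice's explicit end boundary redundant
theorem slice_to_length (docs_words : List String) (a : Int) (ha : 0 ≤ a) :
    PySem.List.slice docs_words (some a) (some (docs_words.length : Int)) =
      PySem.List.slice docs_words (some a) none := by
  rw [PySem.List.slice_from docs_words ha,
      PySem.List.slice_toNat docs_words ha (by positivity)]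
  apply List.take_of_length_le
  simp

-- appending a final name shifts the boundary: pairsF (xs ++ [s]) e closes xs at index(s)
theorem pairsF_snoc (dw : List String) (s : String) (hs : s ∈ dw) :
    ∀ (xs : List String) (e : Int),
    pairsF dw (xs ++ [s]) e =
      pairsF dw xs (((PySem.List.index? dw s).getD 0 : Nat) : Int) ++
        [(pyCapitalize s,
          PySem.List.slice dw (some (((PySem.List.index? dw s).getD 0 : Nat) + 1)) (some e))] := by
  intro xs
  induction xs with
  | nil => intro e; simp [pairsF]
  | cons t tl ih =>
    intro e
    cases tl with
    | nil => simp [pairsF]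
    | cons u r =>
        simp only [List.cons_append, pairsF]
        rw [← List.cons_append, ih e]

-- B's backward pass, reversed, is the forward reference list
theorem parsedB_reverse_eq (dw : List String) :
    ∀ (l : List String), (∀ s ∈ l, s ∈ dw) → ∀ (e : Int),
    (parsedB_pairs dw l e).reverse = pairsF dw l.reverse e := by
  intro l
  induction l with
  | nil => intro _ e; simp [parsedB_pairs, pairsF]
  | cons s rest ih =>
    intro hpre e
    have hs : s ∈ dw := hpre s (by simp)
    obtain ⟨k, hk⟩ : ∃ k, PySem.List.index? dw s = some k :=
      Option.isSome_iff_exists.mp ((PySem.List.index?_isSome_iff dw s).mpr hs)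
    simp only [parsedB_pairs, hk, List.reverse_cons]
    rw [ih (fun x hx => hpre x (List.mem_cons_of_mem _ hx)) ((k : Int)),
      pairsF_snoc dw s hs rest.reverse e, hk]
    simp

-- A's loop is a fold of inserts over the forward reference list with boundary len(docs_words)
theorem parsedA_eq_foldF (dw : List String) :
    ∀ (sl : List String), (∀ s ∈ sl, s ∈ dw) → ∀ (d : PySem.Dict String (List String)),
    parsedA_loop dw sl d =
      (pairsF dw sl (dw.length : Int)).foldl (fun d p => d.insert p.1 p.2) d := by
  intro sl
  induction sl with
  | nil => intro _ d; simp [parsedA_loop, pairsF]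
  | cons s tl ih =>
    intro hpre d
    have hs : s ∈ dw := hpre s (by simp)
    obtain ⟨k, hk⟩ : ∃ k, PySem.List.index? dw s = some k :=
      Option.isSome_iff_exists.mp ((PySem.List.index?_isSome_iff dw s).mpr hs)
    cases tl with
    | nil =>
        simp only [parsedA_loop, hk, pairsF, Option.getD_some, List.foldl_cons, List.foldl_nil]
        rw [slice_to_length dw ((k : Int) + 1) (by positivity)]
    | cons t tl2 =>
        have ht : t ∈ dw := hpre t (by simp)
        obtain ⟨m, hm⟩ : ∃ m, PySem.List.index? dw t = some m :=
          Option.isSome_iff_exists.mp ((PySem.List.index?_isSome_iff dw t).mpr ht)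
        simp only [parsedA_loop, hk, hm, pairsF, Option.getD_some, List.foldl_cons]
        exact ih (fun x hx => hpre x (List.mem_cons_of_mem _ hx)) _

-- ===== VERDICT (by name: the statement is the Claim_ definition above) =====
theorem parsed_details_spec : Claim_equal_parsed_details := by
  intro dw sl _ hpre
  unfold Spec_parsed_details
  simp only [parsed_details, parsed_details_alt]
  rw [parsedA_eq_foldF dw sl hpre,
      parsedB_reverse_eq dw sl.reverse (fun s hs => hpre s (List.mem_reverse.mp hs)),
      List.reverse_reverse]
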